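-- pv_equiv track=rewrite | github.com/mrkmcnamee/blogger-export | blogger-export.py | create_navigation_links
-- ===== SOURCE A (Python) =====
-- from typing import Dict, List
--
-- def create_navigation_links(posts: List) -> Dict:
--     """
--     Creates backwards and forwards navigation links for the posts.
--
--     Args:
--         posts (list): A list of Blogger posts.
--     Returns:
--         dict: A dictionary containing the navigation links for each post.
--     """
--     fallback_url = "../index.html"
--     post_count = len(posts)
--
--     navigation = {}
--     for i, post in enumerate(posts):
--         if i > 0:
--             previous_post_id = posts[i - 1]["id"]
--             previous_url = f"../{previous_post_id}/{previous_post_id}.html"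
--         else:
--             previous_url = fallback_url
--
--         if i < post_count-1:
--             next_post_id = posts[i + 1]["id"]
--             next_url = f"../{next_post_id}/{next_post_id}.html"
--         else:
--             next_url = fallback_url
--
--         navigation[post["id"]] = {
--             "previous": previous_url,
--             "next": next_url
--         }
--
--     return navigation
-- ===== SOURCE B (Python) =====
-- def create_navigation_links(posts):
--     """
--     Creates backwards and forwards navigation links for the posts.
--
--     Divide and conquer: split the post list in half, solve each half with the
--     correct boundary URLs passed down, and concatenate; no index arithmetic
--     or boundary branching inside the sequence.
--     """
--     fallback_url = "../index.html"
--
--     def url(post):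
--         post_id = post["id"]
--         return f"../{post_id}/{post_id}.html"
--
--     def solve(chunk, previous_url, next_url):
--         if len(chunk) == 0:
--             return []
--         if len(chunk) == 1:
--             return [(chunk[0]["id"], {"previous": previous_url, "next": next_url})]
--         mid = len(chunk) // 2
--         left, right = chunk[:mid], chunk[mid:]
--         return solve(left, previous_url, url(right[0])) \
--             + solve(right, url(left[-1]), next_url)
--
--     return dict(solve(posts, fallback_url, fallback_url))
-- ===== Notes on version B (the rewrite author's own statement) =====
-- stated objective: alternative
-- what changed: B replaces A's single indexed loop with boundary conditionals by a divide-and-conquer recursion: split the list in half, solve each half with the correct boundary URLs passed down as parameters, concatenate the pair lists and build the dict once at the end.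
import Mathlib
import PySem

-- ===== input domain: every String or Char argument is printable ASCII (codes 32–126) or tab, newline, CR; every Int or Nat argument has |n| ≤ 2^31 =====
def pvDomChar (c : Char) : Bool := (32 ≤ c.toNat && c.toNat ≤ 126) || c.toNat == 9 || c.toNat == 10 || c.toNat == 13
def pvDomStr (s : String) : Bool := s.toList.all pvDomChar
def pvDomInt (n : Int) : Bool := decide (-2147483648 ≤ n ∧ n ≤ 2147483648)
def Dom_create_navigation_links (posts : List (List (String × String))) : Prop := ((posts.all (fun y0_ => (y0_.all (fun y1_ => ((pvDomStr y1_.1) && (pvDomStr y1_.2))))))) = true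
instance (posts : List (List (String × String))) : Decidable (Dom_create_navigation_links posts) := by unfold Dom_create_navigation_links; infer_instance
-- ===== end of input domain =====

-- B replaces A's indexed loop with boundary conditionals by a divide-and-conquer recursion
-- (solve each half with its boundary URLs passed down, concatenate); objective: alternative.

-- post["id"] (Python dict lookup; inputs where it would raise KeyError are excluded by Pre_, so the "" default is never reached there)
def pvId (post : List (String × String)) : String :=
  PySem.Dict.getD (PySem.Dict.mk post) "id" ""

-- ===== PORT A =====
def create_navigation_links (posts : List (List (String × String))) : List (String × List (String × String)) :=
  let fallback_url := "../index.html"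
  let post_count : Int := posts.length
  let navigation :=
    (PySem.List.enumerate posts).foldl (fun navigation ip =>
      let i := ip.1
      let post := ip.2
      let previous_url :=
        if i > 0 then
          let previous_post_id := pvId ((PySem.List.pyGet? posts (i - 1)).getD [])
          "../" ++ previous_post_id ++ "/" ++ previous_post_id ++ ".html"
        else fallback_url
      let next_url :=
        if i < post_count - 1 then
          let next_post_id := pvId ((PySem.List.pyGet? posts (i + 1)).getD [])
          "../" ++ next_post_id ++ "/" ++ next_post_id ++ ".html"
        else fallback_url
      navigation.insert (pvId post) [("previous", previous_url), ("next", next_url)])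
      (PySem.Dict.empty)
  navigation.items

-- ===== PORT B =====
-- url(post)
def pvUrl (post : List (String × String)) : String :=
  "../" ++ pvId post ++ "/" ++ pvId post ++ ".html"

-- solve(chunk, previous_url, next_url): divide and conquer.
-- chunk[:mid] / chunk[mid:] with 0 ≤ mid ≤ len(chunk) are exactly take/drop;
-- right[0] / left[-1] are total here because both halves are nonempty (len ≥ 2, 1 ≤ mid ≤ len-1).
def pvSolve (chunk : List (List (String × String))) (previous_url next_url : String) :
    List (String × List (String × String)) :=
  match chunk with
  | [] => []
  | [c] => [(pvId c, [("previous", previous_url), ("next", next_url)])]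
  | c0 :: c1 :: rest =>
    let ch := c0 :: c1 :: rest
    let mid := ch.length / 2
    let left := ch.take mid
    let right := ch.drop mid
    pvSolve left previous_url (pvUrl (right.headD []))
      ++ pvSolve right (pvUrl (left.getLastD [])) next_url
termination_by chunk.length
decreasing_by
  · simp [List.length_take]; omega
  · simp [List.length_drop]; omega

def create_navigation_links_alt (posts : List (List (String × String))) : List (String × List (String × String)) :=
  let fallback_url := "../index.html"
  (PySem.Dict.ofList (pvSolve posts fallback_url fallback_url)).items

-- ===== PRECONDITION & SPEC =====
-- Pre_ excludes posts missing the "id" key, on which the Python A raises KeyError (returns no value).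
def Pre_create_navigation_links (posts : List (List (String × String))) : Prop :=
  (posts.all (fun p => (PySem.Dict.mk p).contains "id")) = true
instance (posts : List (List (String × String))) : Decidable (Pre_create_navigation_links posts) := by unfold Pre_create_navigation_links; infer_instance
def pvWitness_create_navigation_links : (List (List (String × String))) :=
  [[("id", "p1"), ("title", "a")], [("id", "p2")], [("id", "p3")]]

def Spec_create_navigation_links (posts : List (List (String × String))) (out : List (String × List (String × String))) : Prop := out = create_navigation_links_alt posts
instance (posts : List (List (String × String))) (out : List (String × List (String × String))) : Decidable (Spec_create_navigation_links posts out) := by unfold Spec_create_navigation_links; infer_instance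

-- ===== CLAIM (what is proved, stated in full; the proofs are below) =====
def Claim_equal_create_navigation_links : Prop := ∀ (posts : List (List (String × String))), Dom_create_navigation_links posts → Pre_create_navigation_links posts → Spec_create_navigation_links posts (create_navigation_links posts)

-- ===== LEMMAS AND PROOFS =====

-- the (key, value) pair A inserts for the enumerated element ip
def pvStepA (posts : List (List (String × String))) (ip : Int × List (String × String)) :
    String × List (String × String) :=
  (pvId ip.2,
   [("previous",
      if ip.1 > 0 then
        let previous_post_id := pvId ((PySem.List.pyGet? posts (ip.1 - 1)).getD [])
        "../" ++ previous_post_id ++ "/" ++ previous_post_id ++ ".html"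
      else "../index.html"),
    ("next",
      if ip.1 < (posts.length : Int) - 1 then
        let next_post_id := pvId ((PySem.List.pyGet? posts (ip.1 + 1)).getD [])
        "../" ++ next_post_id ++ "/" ++ next_post_id ++ ".html"
      else "../index.html")])

-- the entry solve produces at index k, read off the whole list
def pvEntry (chunk : List (List (String × String))) (pu nu : String) (k : Nat) :
    String × List (String × String) :=
  (pvId ((chunk[k]?).getD []),
   [("previous", if k = 0 then pu else pvUrl ((chunk[k-1]?).getD [])),
    ("next", if k+1 < chunk.length then pvUrl ((chunk[k+1]?).getD []) else nu)])

theorem pvSolve_length (chunk : List (List (String × String))) (pu nu : String) :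
    (pvSolve chunk pu nu).length = chunk.length := by
  induction chunk, pu, nu using pvSolve.induct with
  | case1 => simp [pvSolve]
  | case2 => simp [pvSolve]
  | case3 pu nu c0 c1 rest ch mid left right ih1 ih2 =>
    rw [pvSolve, List.length_append, ih1, ih2]
    simp only [left, right, ch, mid, List.length_take, List.length_drop, List.length_cons]
    omega

-- index characterization of solve: each element's links come from its two neighbours,
-- with the boundary URLs at the ends
theorem pvSolve_getElem? (chunk : List (List (String × String))) (pu nu : String) :
    ∀ k : Nat, (pvSolve chunk pu nu)[k]? =
      if k < chunk.length then some (pvEntry chunk pu nu k) else none := by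
  induction chunk, pu, nu using pvSolve.induct with
  | case1 => intro k; simp [pvSolve]
  | case2 c pu nu =>
    intro k
    match k with
    | 0 => simp [pvSolve, pvEntry]
    | (j+1) => simp [pvSolve]
  | case3 pu nu c0 c1 rest ch mid left right ih1 ih2 =>
    intro k
    have hn : ch.length = rest.length + 2 := by simp [ch]
    have hmid : mid = (rest.length + 2) / 2 := by simp only [mid, hn]
    have hleftlen : left.length = mid := by
      simp only [left, List.length_take, hn]; omega
    have hrightlen : right.length = rest.length + 2 - mid := by
      simp only [right, List.length_drop, hn]
    have hl1 : (pvSolve left pu (pvUrl (right.headD []))).length = mid := by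
      rw [pvSolve_length, hleftlen]
    have htake : ∀ j : Nat, j < mid → left[j]? = ch[j]? := by
      intro j hj
      simp [left, hj]
    have hdrop : ∀ j : Nat, right[j]? = ch[mid + j]? := by
      intro j; simp [right, List.getElem?_drop]
    have hhead : right.headD [] = (ch[mid]?).getD [] := by
      rw [List.headD_eq_head?_getD, List.head?_eq_getElem?, hdrop 0, Nat.add_zero]
    have hlast : left.getLastD [] = (ch[mid-1]?).getD [] := by
      rw [List.getLastD_eq_getLast?, List.getLast?_eq_getElem?, hleftlen, htake (mid-1) (by omega)]
    have hchlist : (c0 :: c1 :: rest) = ch := rfl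
    have hstep : pvSolve ch pu nu
        = pvSolve left pu (pvUrl (right.headD [])) ++ pvSolve right (pvUrl (left.getLastD [])) nu := by
      rw [pvSolve]
    rw [hchlist, hstep, hn]
    by_cases hk : k < mid
    · rw [List.getElem?_append_left (by rw [hl1]; exact hk), ih1 k, hleftlen, if_pos hk,
        if_pos (show k < rest.length + 2 by omega)]
      unfold pvEntry
      rw [htake k hk, htake (k-1) (by omega), hleftlen, hn]
      by_cases h1 : k + 1 < mid
      · rw [htake (k+1) h1, if_pos h1, if_pos (show k + 1 < rest.length + 2 by omega)]
      · rw [if_neg h1, if_pos (show k + 1 < rest.length + 2 by omega), hhead,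
          show ch[mid]? = ch[k+1]? from by rw [show mid = k + 1 from by omega]]
    · rw [List.getElem?_append_right (by rw [hl1]; omega), hl1, ih2 (k - mid), hrightlen]
      by_cases hkn : k < rest.length + 2
      · rw [if_pos (by omega), if_pos hkn]
        unfold pvEntry
        rw [hdrop (k - mid), show mid + (k - mid) = k from by omega]
        have hk0 : ¬ k = 0 := by omega
        rw [if_neg hk0]
        by_cases hm0 : k - mid = 0
        · rw [if_pos hm0, hlast, show ch[mid-1]? = ch[k-1]? from by rw [show mid - 1 = k - 1 from by omega]]
          by_cases hnx : k + 1 < rest.length + 2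
          · rw [if_pos (by omega), if_pos (show k + 1 < ch.length from by rw [hn]; omega),
              hdrop (k - mid + 1), show mid + (k - mid + 1) = k + 1 from by omega]
          · rw [if_neg (by omega), if_neg (show ¬ k + 1 < ch.length from by rw [hn]; omega)]
        · rw [if_neg hm0, hdrop (k - mid - 1), show mid + (k - mid - 1) = k - 1 from by omega]
          by_cases hnx : k + 1 < rest.length + 2
          · rw [if_pos (by omega), if_pos (show k + 1 < ch.length from by rw [hn]; omega),
              hdrop (k - mid + 1), show mid + (k - mid + 1) = k + 1 from by omega]
          · rw [if_neg (by omega), if_neg (show ¬ k + 1 < ch.length from by rw [hn]; omega)]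
      · rw [if_neg (by omega), if_neg hkn]

-- solve's entry at index k is exactly the pair A inserts for the enumerated element (k, posts[k])
theorem pvEntry_eq_stepA (posts : List (List (String × String))) (k : Nat) (hk : k < posts.length) :
    pvEntry posts "../index.html" "../index.html" k = pvStepA posts ((0:Int) + k, posts[k]) := by
  unfold pvEntry pvStepA
  simp only [zero_add]
  congr 1
  · rw [List.getElem?_eq_getElem hk]; rfl
  congr 2
  · cases k with
    | zero => norm_num
    | succ j =>
      rw [if_neg (by omega), if_pos (by exact_mod_cast Nat.succ_pos j),
          show ((j+1:Nat):Int) - 1 = ((j:Nat):Int) from by push_cast; ring,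
          PySem.List.pyGet?_natCast]
      rfl
  · by_cases h : k + 1 < posts.length
    · rw [if_pos h, if_pos (by exact_mod_cast (by omega : (k:Int) < (posts.length:Int) - 1)),
          show ((k:Nat):Int) + 1 = ((k+1:Nat):Int) from by push_cast; ring,
          PySem.List.pyGet?_natCast]
      rfl
    · rw [if_neg h, if_neg (by omega)]

-- B's pair list is elementwise exactly A's per-index pairs
theorem pvSolve_eq_map (posts : List (List (String × String))) :
    pvSolve posts "../index.html" "../index.html"
      = (PySem.List.enumerate posts).map (pvStepA posts) := by
  apply List.ext_getElem?
  intro k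
  rw [pvSolve_getElem?, List.getElem?_map, PySem.List.getElem?_enumerate]
  by_cases hk : k < posts.length
  · rw [if_pos hk, List.getElem?_eq_getElem hk]
    simp only [Option.map_some]
    rw [pvEntry_eq_stepA posts k hk]
  · rw [if_neg hk, List.getElem?_eq_none (by omega)]
    simp

-- ===== VERDICT (by name: the statement is the Claim_ definition above) =====
theorem create_navigation_links_spec : Claim_equal_create_navigation_links := by
  intro posts _ _
  unfold Spec_create_navigation_links create_navigation_links create_navigation_links_alt
  refine congrArg PySem.Dict.items ?_
  rw [show PySem.Dict.ofList (pvSolve posts "../index.html" "../index.html")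
        = ((PySem.List.enumerate posts).map (pvStepA posts)).foldl
            (fun d p => d.insert p.1 p.2) PySem.Dict.empty from by
      rw [pvSolve_eq_map]; rfl]
  rw [List.foldl_map]
  rfl
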